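-- pv_equiv track=rewrite | github.com/nermadie/CodeForces_Solutions | CodeforcesRound982Div2/prob02.py | solve
-- ===== SOURCE A (Python) =====
-- def solve(n, a):
--     sorted_a = sorted(a, reverse=True)
--     cur_val = -1
--     result = 2000
--     for i in range(n):
--         if sorted_a[i] != cur_val:
--             cur_val = sorted_a[i]
--             index = a.index(cur_val)
--             result = min(result, index + i)
--     return result
-- ===== SOURCE B (Python) =====
-- def solve(n, a):
--     result = 2000
--     for i, x in enumerate(a):
--         rank = sum(1 for y in a if y > x)
--         if rank < n:
--             result = min(result, i + rank)
--     return result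
-- ===== Notes on version B (the rewrite author's own statement) =====
-- stated objective: alternative
-- what changed: B drops the sort, the value deduplication and the a.index scans entirely: one pass over the array computes each element's descending-sorted position directly by counting strictly greater elements, and minimizes index+rank over the elements whose rank is below n
-- intended difference: when n >= 1, the maximum element of a is A's sentinel -1, and the first -1 strictly beats 2000 and every other candidate value's first-index-plus-rank, A skips the leading run of -1s and returns the larger minimum over the other values only (2000 on (1,[-1])), while B treats -1 as an ordinary value and returns the intended smaller minimum (0 on (1,[-1])). — e.g. on solve(1, [-1]): A returns 2000, B returns 0
import Mathlib
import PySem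

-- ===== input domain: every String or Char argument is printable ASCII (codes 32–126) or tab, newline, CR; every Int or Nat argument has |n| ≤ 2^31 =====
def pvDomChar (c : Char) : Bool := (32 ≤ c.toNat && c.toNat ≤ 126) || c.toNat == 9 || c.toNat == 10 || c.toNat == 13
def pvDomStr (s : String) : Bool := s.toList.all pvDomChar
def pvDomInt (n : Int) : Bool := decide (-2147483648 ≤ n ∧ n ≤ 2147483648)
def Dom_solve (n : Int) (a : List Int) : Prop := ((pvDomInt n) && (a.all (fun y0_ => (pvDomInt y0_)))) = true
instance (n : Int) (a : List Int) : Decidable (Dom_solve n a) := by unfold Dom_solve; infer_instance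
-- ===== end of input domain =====

-- B replaces A's descending sort + dedup scan + repeated a.index calls by a single pass over the
-- array that counts strictly greater elements directly as each element's sorted position (alternative algorithm; quadratic, not claimed faster).


-- ===== PORT A =====
-- index = a.index(v); v ∈ a wherever A calls this (v comes from sorted(a)), so getD 0 is never used
def solveIndex (a : List Int) (v : Int) : Int := ((PySem.List.index? a v).getD 0 : Nat)

def solveStep (a sorted_a : List Int) (st : Int × Int) (i : Int) : Int × Int :=
  let cur_val := st.1
  let result := st.2
  let v := PySem.List.pyGetD sorted_a i 0       -- sorted_a[i]; in range under Pre_solve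
  if v ≠ cur_val then
    let index := solveIndex a v
    (v, min result (index + i))
  else (cur_val, result)

def solve (n : Int) (a : List Int) : Int :=
  let sorted_a := PySem.List.sorted a (fun x => x) true
  ((PySem.List.pyRange 0 n 1).foldl (solveStep a sorted_a) (-1, 2000)).2

-- ===== PORT B =====
-- for i, x in enumerate(a): rank = sum(1 for y in a if y > x) [= countP]; if rank < n: result = min(result, i + rank)
def solve_alt (n : Int) (a : List Int) : Int :=
  (PySem.List.enumerate a).foldl
    (fun result p =>
      let rank : Int := (a.countP (fun y => decide (p.2 < y)) : Nat)
      if rank < n then min result (p.1 + rank) else result)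
    2000

-- ===== PRECONDITION & SPEC =====
-- A indexes sorted_a[i] for i in range(n): it raises IndexError exactly when n > len(a).
def Pre_solve (n : Int) (a : List Int) : Prop := n ≤ (a.length : Int)
instance (n : Int) (a : List Int) : Decidable (Pre_solve n a) := by unfold Pre_solve; infer_instance
def pvWitness_solve : Int × List Int := (2, [3, 1])

-- rank of a value = number of strictly greater elements = its first position in sorted(a, reverse=True)
def pvRank (a : List Int) (v : Int) : Int := a.countP (v < ·)
-- first occurrence index of a value present in a
def pvFirstIdx (a : List Int) (v : Int) : Int := ((a.idxOf v : Nat) : Int)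
-- first index of the sentinel value -1
def pvP (a : List Int) : Int := pvFirstIdx a (-1)

-- when n >= 1, the maximum element of a is A's sentinel -1, and the first -1 comes strictly before
-- 2000 and before every other candidate's first-index-plus-rank (i.e. the skipped -1 attains the
-- minimum), A skips the leading run of -1s and returns the larger minimum over the other values
-- only (2000 on (1,[-1])), while B treats -1 as an ordinary value and returns the intended smaller
-- minimum (0 on (1,[-1])).
def D_solve (n : Int) (a : List Int) : Prop :=
  0 < n ∧ -1 ∈ a.max? ∧ pvP a < 2000 ∧
  ∀ v ∈ a, pvRank a v < n → v = -1 ∨ pvP a < pvFirstIdx a v + pvRank a v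
instance (n : Int) (a : List Int) : Decidable (D_solve n a) := by unfold D_solve; infer_instance

def Spec_solve (n : Int) (a : List Int) (out : Int) : Prop := ¬ D_solve n a → out = solve_alt n a
instance (n : Int) (a : List Int) (out : Int) : Decidable (Spec_solve n a out) := by unfold Spec_solve; infer_instance

def pvDiffWitness_solve : Int × List Int := (1, [-1])
def pvDiffWitnessOut_solve : Int × Int := (2000, 0)

-- ===== CLAIM (what is proved, stated in full; the proofs are below) =====
def Claim_unchanged_solve : Prop := ∀ (n : Int) (a : List Int), Dom_solve n a → Pre_solve n a → Spec_solve n a (solve n a)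
def Claim_changed_solve : Prop := Dom_solve (pvDiffWitness_solve.1) (pvDiffWitness_solve.2) ∧ Pre_solve (pvDiffWitness_solve.1) (pvDiffWitness_solve.2) ∧ D_solve (pvDiffWitness_solve.1) (pvDiffWitness_solve.2) ∧ solve (pvDiffWitness_solve.1) (pvDiffWitness_solve.2) = pvDiffWitnessOut_solve.1 ∧ solve_alt (pvDiffWitness_solve.1) (pvDiffWitness_solve.2) = pvDiffWitnessOut_solve.2 ∧ pvDiffWitnessOut_solve.1 ≠ pvDiffWitnessOut_solve.2
def Claim_exact_solve : Prop := ∀ (n : Int) (a : List Int), Dom_solve n a → Pre_solve n a → D_solve n a → solve n a ≠ solve_alt n a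

-- ===== LEMMAS AND PROOFS =====

-- Nat-valued rank used by the proofs (pvRank is its Int coercion)
def pvRankN (a : List Int) (v : Int) : Nat := a.countP (fun x => decide (v < x))

-- the abstract loop A's port reduces to: walk the distinct values in descending order,
-- j = number of elements of a strictly greater than the current value (its sorted position)
def pvGo (n : Int) (a : List Int) : List Int → Nat → Int → Int
  | [], _, r => r
  | v :: vs, j, r =>
      if n ≤ (j : Int) then r
      else pvGo n a vs (j + a.count v) (min r ((((List.idxOf? v a).getD 0 : Nat) : Int) + (j : Int)))

-- the distinct values of a, descending
def pvDs (a : List Int) : List Int := PySem.List.sorted (PySem.Set.ofList a) (fun x => x) true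

lemma pvDs_nodup (a : List Int) : (pvDs a).Nodup :=
  ((PySem.List.sorted_perm (PySem.Set.ofList a) (fun x => x) true).nodup_iff).mpr
    (PySem.Set.nodup_ofList a)

lemma pvDs_mem (a : List Int) (v : Int) : v ∈ pvDs a ↔ v ∈ a := by
  unfold pvDs
  rw [PySem.List.mem_sorted]
  exact PySem.Set.mem_ofList a v

lemma pvDs_pairwise (a : List Int) : (pvDs a).Pairwise (· > ·) := by
  have h1 := PySem.List.sorted_pairwise_rev (PySem.Set.ofList a) (fun x => x)
  have h2 := pvDs_nodup a
  unfold pvDs at *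
  have := h1.and (List.Pairwise.imp (fun h => h) h2)
  exact this.imp (fun ⟨hle, hne⟩ => lt_of_le_of_ne hle (Ne.symm hne))

lemma pvCount_flatMap (a : List Int) :
    ∀ (ds : List Int), ds.Nodup → ∀ x : Int,
      ((ds.flatMap fun v => List.replicate (a.count v) v).count x)
        = if x ∈ ds then a.count x else 0 := by
  intro ds
  induction ds with
  | nil => simp
  | cons v vs ih =>
    intro hnd x
    rw [List.flatMap_cons, List.count_append, List.count_replicate,
        ih hnd.of_cons x]
    by_cases hxv : x = v
    · subst hxv
      simp [List.Nodup.notMem hnd]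
    · simp [hxv, Ne.symm hxv, beq_iff_eq]

lemma pvFlat_perm (a : List Int) :
    ((pvDs a).flatMap fun v => List.replicate (a.count v) v).Perm a := by
  rw [List.perm_iff_count]
  intro x
  rw [pvCount_flatMap a (pvDs a) (pvDs_nodup a) x]
  by_cases hx : x ∈ a
  · simp [(pvDs_mem a x).mpr hx]
  · simp [hx, (pvDs_mem a x), List.count_eq_zero.mpr hx]

lemma pvFlat_pairwise (a : List Int) :
    ∀ (ds : List Int), ds.Pairwise (· > ·) →
      ((ds.flatMap fun v => List.replicate (a.count v) v).Pairwise (fun x y => y ≤ x)) := by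
  intro ds
  induction ds with
  | nil => simp
  | cons v vs ih =>
    intro hp
    rw [List.flatMap_cons, List.pairwise_append]
    refine ⟨?_, ih hp.of_cons, ?_⟩
    · exact List.pairwise_replicate.mpr (Or.inr le_rfl)
    · intro x hx y hy
      rw [List.eq_of_mem_replicate hx]
      obtain ⟨w, hw, hyw⟩ := List.mem_flatMap.mp hy
      rw [List.eq_of_mem_replicate hyw]
      exact le_of_lt (List.rel_of_pairwise_cons hp hw)

-- sorted(a, reverse=True) is the concatenation of the runs of the distinct values, descending
lemma pvSorted_eq_flatMap (a : List Int) :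
    PySem.List.sorted a (fun x => x) true
      = (pvDs a).flatMap (fun v => List.replicate (a.count v) v) := by
  apply List.Perm.eq_of_pairwise (le := fun x y : Int => y ≤ x)
  · intro x y _ _ h1 h2; omega
  · exact PySem.List.sorted_pairwise_rev a (fun x => x)
  · exact pvFlat_pairwise a (pvDs a) (pvDs_pairwise a)
  · exact (PySem.List.sorted_perm a (fun x => x) true).trans (pvFlat_perm a).symm

lemma pvGetAt (sorted_a pre rest : List Int) (v : Int) (hs : sorted_a = pre ++ v :: rest) :
    PySem.List.pyGetD sorted_a ((pre.length : Nat) : Int) 0 = v := by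
  rw [PySem.List.pyGetD_natCast]
  subst hs
  rw [List.getD_eq_getElem?_getD, List.getElem?_append_right (Nat.le_refl _)]
  simp

-- skipping inside a run of equal values is the identity
lemma pvSkipRun (a : List Int) (n : Int) (v r' : Int) :
    ∀ (t : Nat) (pre2 tail2 : List Int) (sorted_a : List Int),
      sorted_a = pre2 ++ List.replicate t v ++ tail2 →
      (PySem.List.pyRange (pre2.length : Int) n 1).foldl (solveStep a sorted_a) (v, r')
        = (PySem.List.pyRange ((pre2.length + t : Nat) : Int) n 1).foldl (solveStep a sorted_a) (v, r') := by
  intro t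
  induction t with
  | zero => intro pre2 tail2 sorted_a _; simp
  | succ t ih =>
    intro pre2 tail2 sorted_a hs
    by_cases hn : ((pre2.length : Int)) < n
    · rw [PySem.List.pyRange_one_cons hn, List.foldl_cons]
      have hstep : solveStep a sorted_a (v, r') (pre2.length : Int) = (v, r') := by
        have hget : PySem.List.pyGetD sorted_a ((pre2.length : Nat) : Int) 0 = v := by
          apply pvGetAt sorted_a pre2 (List.replicate t v ++ tail2) v
          rw [hs, List.replicate_succ]; simp
        simp [solveStep, hget]
      rw [hstep]
      have hs2 : sorted_a = (pre2 ++ [v]) ++ List.replicate t v ++ tail2 := by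
        rw [hs, List.replicate_succ]; simp
      have := ih (pre2 ++ [v]) tail2 sorted_a hs2
      simp only [List.length_append, List.length_cons, List.length_nil] at this ⊢
      have e1 : ((pre2.length : Int)) + 1 = (((pre2.length + (0 + 1) : Nat)) : Int) := by push_cast; ring
      rw [e1, this]
      congr 1
      push_cast; ring_nf
    · rw [PySem.List.pyRange_one_eq_nil (by omega), PySem.List.pyRange_one_eq_nil (by push_cast; omega)]

-- A's loop over range(n), started after the first j sorted positions, computes pvGo
lemma pvALoop (a : List Int) (n : Int) (hn : n ≤ (a.length : Int)) :
    ∀ (ds' : List Int) (pre : List Int) (c r : Int) (sorted_a : List Int),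
      sorted_a = pre ++ ds'.flatMap (fun v => List.replicate (a.count v) v) →
      sorted_a = PySem.List.sorted a (fun x => x) true →
      ds'.Pairwise (· > ·) → (∀ v ∈ ds', v ∈ a) →
      ((pre.length : Int) < n → ∀ v vs, ds' = v :: vs → c ≠ v) →
      ((PySem.List.pyRange (pre.length : Int) n 1).foldl (solveStep a sorted_a) (c, r)).2
        = pvGo n a ds' pre.length r := by
  intro ds'
  induction ds' with
  | nil =>
    intro pre c r sorted_a hs hss _ _ _
    have hlen : pre.length = a.length := by
      have h1 : sorted_a.length = a.length := by
        rw [hss]; exact PySem.List.length_sorted a _ true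
      rw [hs] at h1; simpa using h1
    rw [PySem.List.pyRange_one_eq_nil (by omega)]
    simp [pvGo]
  | cons v vs ih =>
    intro pre c r sorted_a hs hss hp hm hc
    by_cases hn2 : ((pre.length : Int)) < n
    · have hva : v ∈ a := hm v (List.mem_cons_self ..)
      have hcnt : 0 < a.count v := List.count_pos_iff.mpr hva
      have hrep : List.replicate (a.count v) v = v :: List.replicate (a.count v - 1) v := by
        cases h : a.count v with
        | zero => omega
        | succ k => simp [List.replicate_succ]
      have hs1 : sorted_a = pre ++ v :: (List.replicate (a.count v - 1) v
          ++ vs.flatMap (fun w => List.replicate (a.count w) w)) := by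
        rw [hs, List.flatMap_cons, hrep]; simp
      rw [PySem.List.pyRange_one_cons hn2, List.foldl_cons]
      have hget := pvGetAt sorted_a pre _ v hs1
      have hne : v ≠ c := (hc hn2 v vs rfl).symm
      have hstep : solveStep a sorted_a (c, r) (pre.length : Int)
          = (v, min r ((((PySem.List.index? a v).getD 0 : Nat) : Int) + (pre.length : Int))) := by
        simp [solveStep, solveIndex, hget, hne]
      rw [hstep]
      have hs2 : sorted_a = (pre ++ [v]) ++ List.replicate (a.count v - 1) v
          ++ vs.flatMap (fun w => List.replicate (a.count w) w) := by
        rw [hs1]; simp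
      have hskip := pvSkipRun a n v (min r ((((PySem.List.index? a v).getD 0 : Nat) : Int) + (pre.length : Int)))
        (a.count v - 1) (pre ++ [v]) _ sorted_a hs2
      have e1 : ((pre.length : Int)) + 1 = (((pre ++ [v]).length : Nat) : Int) := by
        simp
      rw [e1, hskip]
      have hs3 : sorted_a = (pre ++ List.replicate (a.count v) v)
          ++ vs.flatMap (fun w => List.replicate (a.count w) w) := by
        rw [hs, List.flatMap_cons]; simp
      have hc' : (((pre ++ List.replicate (a.count v) v).length : Int) < n →
          ∀ w ws, vs = w :: ws → v ≠ w) := by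
        intro _ w ws hvs
        subst hvs
        exact ne_of_gt (List.rel_of_pairwise_cons hp (List.mem_cons_self ..))
      have hrec := ih (pre ++ List.replicate (a.count v) v) v
        (min r ((((PySem.List.index? a v).getD 0 : Nat) : Int) + (pre.length : Int)))
        sorted_a hs3 hss hp.of_cons (fun w hw => hm w (List.mem_cons_of_mem v hw)) hc'
      have e2 : (((pre ++ [v]).length + (a.count v - 1) : Nat) : Int)
          = (((pre ++ List.replicate (a.count v) v).length : Nat) : Int) := by
        simp; omega
      rw [e2, hrec]
      show _ = pvGo n a (v :: vs) pre.length r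
      rw [pvGo]
      rw [if_neg (by omega)]
      simp only [List.length_append, List.length_replicate, PySem.List.index?_eq_idxOf?]
    · rw [PySem.List.pyRange_one_eq_nil (by omega)]
      rw [pvGo]
      rw [if_pos (by omega)]
      simp

-- B's fold step, named for the proofs (definitionally solve_alt's lambda)
def pvBStep (n : Int) (a : List Int) (result : Int) (p : Int × Int) : Int :=
  if ((pvRankN a p.2 : Nat) : Int) < n then min result (p.1 + ((pvRankN a p.2 : Nat) : Int)) else result

lemma pvB_le_init (n : Int) (a : List Int) :
    ∀ (l : List (Int × Int)) (r : Int), l.foldl (pvBStep n a) r ≤ r := by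
  intro l
  induction l with
  | nil => intro r; exact le_refl r
  | cons p t ih =>
    intro r
    rw [List.foldl_cons]
    by_cases h : ((pvRankN a p.2 : Nat) : Int) < n
    · rw [show pvBStep n a r p = min r (p.1 + ((pvRankN a p.2 : Nat) : Int)) from by
        unfold pvBStep; rw [if_pos h]]
      exact le_trans (ih _) (min_le_left _ _)
    · rw [show pvBStep n a r p = r from by unfold pvBStep; rw [if_neg h]]
      exact ih r

lemma pvB_le_cand (n : Int) (a : List Int) :
    ∀ (l : List (Int × Int)) (r : Int) (p : Int × Int), p ∈ l →
      ((pvRankN a p.2 : Nat) : Int) < n →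
      l.foldl (pvBStep n a) r ≤ p.1 + ((pvRankN a p.2 : Nat) : Int) := by
  intro l
  induction l with
  | nil => intro r p hp; simp at hp
  | cons q t ih =>
    intro r p hp hrk
    rw [List.foldl_cons]
    rcases List.mem_cons.mp hp with h | h
    · subst h
      rw [show pvBStep n a r p = min r (p.1 + ((pvRankN a p.2 : Nat) : Int)) from by
        unfold pvBStep; rw [if_pos hrk]]
      exact le_trans (pvB_le_init n a t _) (min_le_right _ _)
    · exact ih _ p h hrk

lemma pvB_attained (n : Int) (a : List Int) :
    ∀ (l : List (Int × Int)) (r : Int),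
      l.foldl (pvBStep n a) r = r ∨
      ∃ p ∈ l, ((pvRankN a p.2 : Nat) : Int) < n ∧
        l.foldl (pvBStep n a) r = p.1 + ((pvRankN a p.2 : Nat) : Int) := by
  intro l
  induction l with
  | nil => intro r; exact Or.inl rfl
  | cons q t ih =>
    intro r
    rw [List.foldl_cons]
    by_cases h : ((pvRankN a q.2 : Nat) : Int) < n
    · rw [show pvBStep n a r q = min r (q.1 + ((pvRankN a q.2 : Nat) : Int)) from by
        unfold pvBStep; rw [if_pos h]]
      rcases ih (min r (q.1 + ((pvRankN a q.2 : Nat) : Int))) with heq | ⟨p, hp, hrk, he⟩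
      · rcases le_total r (q.1 + ((pvRankN a q.2 : Nat) : Int)) with hle | hle
        · exact Or.inl (by rw [heq, min_eq_left hle])
        · exact Or.inr ⟨q, List.mem_cons_self .., h, by rw [heq, min_eq_right hle]⟩
      · exact Or.inr ⟨p, List.mem_cons_of_mem q hp, hrk, he⟩
    · rw [show pvBStep n a r q = r from by unfold pvBStep; rw [if_neg h]]
      rcases ih r with heq | ⟨p, hp, hrk, he⟩
      · exact Or.inl heq
      · exact Or.inr ⟨p, List.mem_cons_of_mem q hp, hrk, he⟩

lemma pvSolveAlt_eq_fold (n : Int) (a : List Int) :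
    solve_alt n a = (PySem.List.enumerate a).foldl (pvBStep n a) 2000 := rfl

-- the pair (a.idxOf v, v) occurs in enumerate(a) for v ∈ a
lemma pvIdx_mem_enumerate (a : List Int) (v : Int) (hv : v ∈ a) :
    (((a.idxOf v : Nat) : Int), v) ∈ PySem.List.enumerate a := by
  rw [PySem.List.mem_enumerate_iff a 0]
  exact ⟨a.idxOf v, List.idxOf_lt_length_of_mem hv, by simp [List.getElem_idxOf]⟩

-- the head of pvDs is the maximum, its rank is 0
lemma pvDs_head_rank (a : List Int) :
    ∀ u t, pvDs a = u :: t → 0 = pvRankN a u := by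
  intro u t hds
  symm
  unfold pvRankN
  rw [List.countP_eq_zero]
  intro x hx
  simp only [decide_eq_true_eq]
  have hxds : x ∈ pvDs a := (pvDs_mem a x).mpr hx
  rw [hds] at hxds
  rcases List.mem_cons.mp hxds with h | h
  · subst h; omega
  · have := List.rel_of_pairwise_cons (hds ▸ pvDs_pairwise a) h
    omega

lemma pvGo_le_init (n : Int) (a : List Int) :
    ∀ (l : List Int) (j : Nat) (r : Int), pvGo n a l j r ≤ r := by
  intro l
  induction l with
  | nil => intro j r; exact le_refl r
  | cons v vs ih =>
    intro j r
    rw [pvGo]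
    by_cases hj : n ≤ (j : Int)
    · rw [if_pos hj]
    · rw [if_neg hj]
      exact le_trans (ih _ _) (min_le_left _ _)

lemma pvGo_min (n : Int) (a : List Int) :
    ∀ (l : List Int) (j : Nat) (x y : Int),
      pvGo n a l j (min x y) = min x (pvGo n a l j y) := by
  intro l
  induction l with
  | nil => intro j x y; rfl
  | cons v vs ih =>
    intro j x y
    rw [pvGo, pvGo]
    by_cases hj : n ≤ (j : Int)
    · rw [if_pos hj, if_pos hj]
    · rw [if_neg hj, if_neg hj, min_assoc, ih]

lemma pvIdxOf?_eq (v : Int) (a : List Int) (h : v ∈ a) : List.idxOf? v a = some (a.idxOf v) := by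
  induction a with
  | nil => simp at h
  | cons y t ih =>
    by_cases hvy : y = v
    · subst hvy; simp [List.idxOf?_cons, List.idxOf_cons_self]
    · rw [List.idxOf?_cons, List.idxOf_cons]
      simp only [beq_iff_eq, hvy, if_false]
      rcases List.mem_cons.mp h with h1 | h1
      · exact absurd h1.symm hvy
      · have hb : (y == v) = false := by simp [hvy]
        rw [ih h1]; simp [hb]

lemma pvCountP_split (u : Int) : ∀ (a : List Int),
    a.countP (fun x => decide (u ≤ x)) = a.countP (fun x => decide (u < x)) + a.count u := by
  intro a
  induction a with
  | nil => simp
  | cons y t ih =>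
    rw [List.countP_cons, List.countP_cons, List.count_cons, ih]
    by_cases h1 : u = y
    · subst h1; simp; omega
    · have hb : (y == u) = false := by simp [Ne.symm h1]
      by_cases h2 : u < y
      · simp [h2, le_of_lt h2, hb]; omega
      · have h3 : ¬ u ≤ y := by omega
        simp [h2, h3, hb]

-- adjacent distinct values: the rank of the next value is rank + multiplicity of the current
lemma pvDs_chain (a : List Int) :
    List.IsChain (fun u w => pvRankN a w = pvRankN a u + a.count u) (pvDs a) := by
  rw [List.isChain_iff_getElem]
  intro i hi
  have hpw := List.pairwise_iff_getElem.mp (pvDs_pairwise a)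
  have hiff : ∀ x ∈ a, ((pvDs a)[i + 1] < x ↔ (pvDs a)[i] ≤ x) := by
    intro x hx
    constructor
    · intro hlt
      obtain ⟨k, hk, hxk⟩ := List.getElem_of_mem ((pvDs_mem a x).mpr hx)
      by_cases hki : k ≤ i
      · calc (pvDs a)[i] ≤ (pvDs a)[k] := by
              rcases Nat.lt_or_ge k i with h | h
              · exact le_of_lt (hpw k i hk (by omega) h)
              · have : k = i := by omega
                subst this; exact le_refl _
            _ = x := hxk
      · have hk1 : i + 1 ≤ k := by omega
        have : x ≤ (pvDs a)[i+1] := by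
          rcases Nat.lt_or_ge (i+1) k with h | h
          · exact le_of_lt (hxk ▸ hpw (i+1) k (by omega) hk h)
          · have : k = i + 1 := by omega
            subst this; exact le_of_eq hxk.symm
        omega
    · intro hle
      have := hpw i (i+1) (by omega) hi (by omega)
      omega
  have h1 : pvRankN a ((pvDs a)[i+1]) = a.countP (fun x => decide ((pvDs a)[i] ≤ x)) := by
    unfold pvRankN
    apply List.countP_congr
    intro x hx
    simp only [decide_eq_true_eq]
    exact hiff x hx
  rw [h1, pvCountP_split]
  rfl

-- upper bound: pvGo is at most any processed candidate's first-index-plus-rank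
lemma pvGo_le (n : Int) (a : List Int) :
    ∀ (l : List Int) (j : Nat) (r : Int),
      l.Pairwise (· > ·) → (∀ v ∈ l, v ∈ a) →
      List.IsChain (fun u w => pvRankN a w = pvRankN a u + a.count u) l →
      (∀ u t, l = u :: t → j = pvRankN a u) →
      ∀ v ∈ l, (pvRankN a v : Int) < n →
        pvGo n a l j r ≤ ((a.idxOf v : Nat) : Int) + (pvRankN a v : Int) := by
  intro l
  induction l with
  | nil => intro j r _ _ _ _ v hv; simp at hv
  | cons u t ih =>
    intro j r hp hm hch hhead v hv hvn
    have hju : j = pvRankN a u := hhead u t rfl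
    have hja : pvRankN a u ≤ pvRankN a v := by
      rcases List.mem_cons.mp hv with h | h
      · subst h; exact le_refl _
      · apply List.countP_mono_left
        intro x _ hx
        simp only [decide_eq_true_eq] at *
        exact lt_trans (List.rel_of_pairwise_cons hp h) hx
    have hjn : ¬ n ≤ (j : Int) := by
      rw [hju]; omega
    rw [pvGo, if_neg hjn]
    rcases List.mem_cons.mp hv with h | h
    · subst h
      refine le_trans (pvGo_le_init n a _ _ _) ?_
      rw [pvIdxOf?_eq v a (hm v (List.mem_cons_self ..))]
      simp [hju]
    · -- v in tail
      have hht : ∀ w s, t = w :: s → j + a.count u = pvRankN a w := by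
        intro w s hts
        subst hts
        have := hch.rel_head
        omega
      exact ih _ _ hp.of_cons (fun w hw => hm w (List.mem_cons_of_mem u hw)) hch.tail hht v h hvn

-- lower bound: if every processed candidate beats p and so does r, pvGo stays above p
lemma pvGo_gt (n : Int) (a : List Int) (p : Int) :
    ∀ (l : List Int) (j : Nat) (r : Int),
      (∀ v ∈ l, v ∈ a) →
      List.IsChain (fun u w => pvRankN a w = pvRankN a u + a.count u) l →
      (∀ u t, l = u :: t → j = pvRankN a u) →
      p < r →
      (∀ v ∈ l, (pvRankN a v : Int) < n → p < ((a.idxOf v : Nat) : Int) + (pvRankN a v : Int)) →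
      p < pvGo n a l j r := by
  intro l
  induction l with
  | nil => intro j r _ _ _ hr _; exact hr
  | cons u t ih =>
    intro j r hm hch hhead hr hterms
    have hju : j = pvRankN a u := hhead u t rfl
    rw [pvGo]
    by_cases hj : n ≤ (j : Int)
    · rw [if_pos hj]; exact hr
    · rw [if_neg hj]
      have hht : ∀ w s, t = w :: s → j + a.count u = pvRankN a w := by
        intro w s hts; subst hts
        have := hch.rel_head; omega
      apply ih _ _ (fun w hw => hm w (List.mem_cons_of_mem u hw)) hch.tail hht
      · apply lt_min hr
        have := hterms u (List.mem_cons_self ..) (by omega)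
        rw [pvIdxOf?_eq u a (hm u (List.mem_cons_self ..))]
        simpa [hju] using this
      · intro w hw hwn
        exact hterms w (List.mem_cons_of_mem u hw) hwn

lemma pvIdxOf_le (a : List Int) : ∀ (k : Nat) (hk : k < a.length), a.idxOf a[k] ≤ k := by
  induction a with
  | nil => intro k hk; simp at hk
  | cons y t ih =>
    intro k hk
    cases k with
    | zero => simp [List.idxOf_cons_self]
    | succ m =>
      have hm : m < t.length := by simpa using Nat.lt_of_succ_lt_succ hk
      rw [List.getElem_cons_succ, List.idxOf_cons]
      by_cases h : y = t[m]
      · simp [h]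
      · have hb : (y == t[m]'hm) = false := by simp [h]
        simp only [hb, cond_false]
        have := ih m hm
        omega

-- B's pass over all indices computes the same minimum as the distinct-value walk
lemma pvSolveAlt_eq_go (n : Int) (a : List Int) :
    solve_alt n a = pvGo n a (pvDs a) 0 2000 := by
  have hmem : ∀ v ∈ pvDs a, v ∈ a := fun v hv => (pvDs_mem a v).mp hv
  have hch := pvDs_chain a
  have hhead := pvDs_head_rank a
  have hhead0 : ∀ u t, pvDs a = u :: t → (0 : Nat) = pvRankN a u := hhead
  rw [pvSolveAlt_eq_fold]
  apply le_antisymm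
  · -- solve_alt ≤ pvGo: every candidate A's walk min's in is one of B's candidates
    have h2000 : (PySem.List.enumerate a).foldl (pvBStep n a) 2000 ≤ 2000 :=
      pvB_le_init n a _ 2000
    have hcand : ∀ v ∈ pvDs a, (pvRankN a v : Int) < n →
        (PySem.List.enumerate a).foldl (pvBStep n a) 2000
          ≤ ((a.idxOf v : Nat) : Int) + (pvRankN a v : Int) := by
      intro v hv hrk
      exact pvB_le_cand n a _ 2000 (((a.idxOf v : Nat) : Int), v)
        (pvIdx_mem_enumerate a v (hmem v hv)) hrk
    have := pvGo_gt n a ((PySem.List.enumerate a).foldl (pvBStep n a) 2000 - 1)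
      (pvDs a) 0 2000 hmem hch hhead0 (by omega)
      (fun v hv hrk => by have := hcand v hv hrk; omega)
    omega
  · -- pvGo ≤ solve_alt: B's result is 2000 or some index's i + rank, both dominate pvGo
    rcases pvB_attained n a (PySem.List.enumerate a) 2000 with heq | ⟨p, hp, hrk, he⟩
    · rw [heq]; exact pvGo_le_init n a _ _ _
    · rw [he]
      obtain ⟨k, hk, hpk⟩ := (PySem.List.mem_enumerate_iff a 0 p).mp hp
      have hv : a[k] ∈ a := List.getElem_mem hk
      have hvds : a[k] ∈ pvDs a := (pvDs_mem a a[k]).mpr hv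
      have hrk' : (pvRankN a a[k] : Int) < n := by rw [hpk] at hrk; exact hrk
      have h1 := pvGo_le n a (pvDs a) 0 2000 (pvDs_pairwise a) hmem hch hhead0
        a[k] hvds hrk'
      have hidx : a.idxOf a[k] ≤ k := pvIdxOf_le a k hk
      rw [hpk]
      simp only [zero_add]
      calc pvGo n a (pvDs a) 0 2000 ≤ ((a.idxOf a[k] : Nat) : Int) + (pvRankN a a[k] : Int) := h1
        _ ≤ (k : Int) + (pvRankN a a[k] : Int) := by
            have : (a.idxOf a[k] : Int) ≤ (k : Int) := by exact_mod_cast hidx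
            omega

lemma pvSolve_eq_go (n : Int) (a : List Int) (hpre : Pre_solve n a)
    (hd : ¬ (1 ≤ n ∧ (-1 : Int) ∈ a ∧ ∀ x ∈ a, x ≤ -1)) :
    solve n a = pvGo n a (pvDs a) 0 2000 := by
  unfold Pre_solve at hpre
  unfold solve
  rw [show ((0 : Int)) = ((([] : List Int).length : Nat) : Int) from by simp]
  have hc : ((([] : List Int).length : Int) < n → ∀ v vs, pvDs a = v :: vs → (-1 : Int) ≠ v) := by
    intro h1n v vs hds
    have hv : v ∈ a := (pvDs_mem a v).mp (hds ▸ List.mem_cons_self ..)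
    push Not at hd
    simp only [List.length_nil, Nat.cast_zero] at h1n
    rcases Decidable.em ((-1 : Int) ∈ a) with hmem | hmem
    · obtain ⟨x, hxa, hxgt⟩ := hd (by omega) hmem
      have hxds : x ∈ pvDs a := (pvDs_mem a x).mpr hxa
      rw [hds] at hxds
      rcases List.mem_cons.mp hxds with h | h
      · subst h; omega
      · have := List.rel_of_pairwise_cons (hds ▸ pvDs_pairwise a) h
        omega
    · intro h; rw [← h] at hv; exact hmem hv
  exact pvALoop a n hpre (pvDs a) [] (-1) 2000 _
    (by simpa using pvSorted_eq_flatMap a) rfl (pvDs_pairwise a)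
    (fun v hv => (pvDs_mem a v).mp hv) hc

lemma pvDs_head_D0 (a : List Int) (hmem : (-1 : Int) ∈ a) (hle : ∀ x ∈ a, x ≤ -1) :
    ∃ vs, pvDs a = -1 :: vs := by
  cases hds : pvDs a with
  | nil =>
    have := (pvDs_mem a (-1)).mpr hmem
    rw [hds] at this
    simp at this
  | cons h vs =>
    have hh : h ∈ a := (pvDs_mem a h).mp (hds ▸ List.mem_cons_self ..)
    have h1 : h ≤ -1 := hle h hh
    have hm1 : (-1 : Int) ∈ h :: vs := hds ▸ (pvDs_mem a (-1)).mpr hmem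
    rcases List.mem_cons.mp hm1 with e | e
    · exact ⟨vs, by rw [e]⟩
    · have := List.rel_of_pairwise_cons (hds ▸ pvDs_pairwise a) e
      omega

lemma pvRankN_neg1 (a : List Int) (hle : ∀ x ∈ a, x ≤ -1) : pvRankN a (-1) = 0 := by
  unfold pvRankN
  rw [List.countP_eq_zero]
  intro x hx
  simp only [decide_eq_true_eq]
  have := hle x hx
  omega

-- inside the change region A skips the leading -1 run and continues from its end
lemma pvSolve_inside (n : Int) (a : List Int) (hpre : Pre_solve n a)
    (vs : List Int) (hds : pvDs a = -1 :: vs) :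
    solve n a = pvGo n a vs (a.count (-1)) 2000 := by
  unfold Pre_solve at hpre
  unfold solve
  show ((PySem.List.pyRange 0 n 1).foldl
      (solveStep a (PySem.List.sorted a (fun x => x) true)) (-1, 2000)).2
    = pvGo n a vs (a.count (-1)) 2000
  have hflat := pvSorted_eq_flatMap a
  rw [hds, List.flatMap_cons] at hflat
  have hskip := pvSkipRun a n (-1) 2000 (a.count (-1)) []
    (vs.flatMap (fun w => List.replicate (a.count w) w))
    (PySem.List.sorted a (fun x => x) true) (by simpa using hflat)
  rw [show ((0 : Int)) = ((([] : List Int).length : Nat) : Int) from by simp, hskip]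
  have hc : (((List.replicate (a.count (-1)) (-1 : Int)).length : Int) < n →
      ∀ w ws, vs = w :: ws → (-1 : Int) ≠ w) := by
    intro _ w ws hvs
    have hw : w ∈ vs := hvs ▸ List.mem_cons_self ..
    have := List.rel_of_pairwise_cons (hds ▸ pvDs_pairwise a) hw
    omega
  have := pvALoop a n hpre vs (List.replicate (a.count (-1)) (-1)) (-1) 2000
    (PySem.List.sorted a (fun x => x) true) (by rw [hflat]) rfl
    ((hds ▸ pvDs_pairwise a).of_cons)
    (fun w hw => (pvDs_mem a w).mp (hds ▸ List.mem_cons_of_mem _ hw)) hc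
  simp only [List.length_replicate] at this
  simpa using this

lemma pvSolveAlt_inside (n : Int) (a : List Int) (h1n : 1 ≤ n) (hmem : (-1 : Int) ∈ a)
    (vs : List Int) (hds : pvDs a = -1 :: vs) :
    solve_alt n a = min ((a.idxOf (-1) : Nat) : Int) (pvGo n a vs (a.count (-1)) 2000) := by
  rw [pvSolveAlt_eq_go, hds, pvGo]
  rw [if_neg (by push_cast; omega)]
  rw [pvIdxOf?_eq (-1) a hmem]
  simp only [Option.getD_some, Nat.cast_zero, add_zero, zero_add]
  rw [min_comm (2000 : Int), pvGo_min]

-- ===== VERDICT (by name: the statement is the Claim_ definition above) =====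
theorem solve_spec : Claim_unchanged_solve := by
  intro n a _ hpre hd
  by_cases hD0 : (1 ≤ n ∧ (-1 : Int) ∈ a ∧ ∀ x ∈ a, x ≤ -1)
  · obtain ⟨h1n, hmem, hle⟩ := hD0
    obtain ⟨vs, hds⟩ := pvDs_head_D0 a hmem hle
    rw [pvSolve_inside n a hpre vs hds, pvSolveAlt_inside n a h1n hmem vs hds]
    have hmax : -1 ∈ a.max? := by
      rw [Option.mem_def, List.max?_eq_some_iff]
      exact ⟨hmem, hle⟩
    have hpP : pvP a = ((a.idxOf (-1) : Nat) : Int) := rfl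
    have hIdx : ∀ v ∈ a, pvFirstIdx a v = ((a.idxOf v : Nat) : Int) := fun v _ => rfl
    have hhead_vs : ∀ w ws, vs = w :: ws → a.count (-1) = pvRankN a w := by
      intro w ws hvs
      have hch := pvDs_chain a
      rw [hds, hvs] at hch
      have := hch.rel_head
      rw [pvRankN_neg1 a hle] at this
      omega
    have hmem_vs : ∀ v ∈ vs, v ∈ a :=
      fun v hv => (pvDs_mem a v).mp (hds ▸ List.mem_cons_of_mem _ hv)
    have hA_le : pvGo n a vs (a.count (-1)) 2000 ≤ ((a.idxOf (-1) : Nat) : Int) := by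
      unfold D_solve at hd
      push Not at hd
      rcases Decidable.em (((a.idxOf (-1) : Nat) : Int) < 2000) with hp | hp
      · obtain ⟨v, hva, hvrk, hvne, hvle⟩ := hd (by omega) hmax (by omega)
        have hv_vs : v ∈ vs := by
          have := (pvDs_mem a v).mpr hva
          rw [hds] at this
          rcases List.mem_cons.mp this with e | e
          · exact absurd e hvne
          · exact e
        have hb := pvGo_le n a vs (a.count (-1)) 2000 ((hds ▸ pvDs_pairwise a).of_cons) hmem_vs
          ((hds ▸ pvDs_chain a).tail) hhead_vs v hv_vs (by
            have : pvRank a v = ((pvRankN a v : Nat) : Int) := rfl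
            omega)
        rw [hIdx v hva] at hvle
        have : pvRank a v = ((pvRankN a v : Nat) : Int) := rfl
        omega
      · exact le_trans (pvGo_le_init n a vs _ _) (by omega)
    exact (min_eq_right hA_le).symm
  · rw [pvSolve_eq_go n a hpre hD0, pvSolveAlt_eq_go n a]

theorem solve_changed : Claim_changed_solve := by
  unfold Claim_changed_solve; decide

theorem solve_tight : Claim_exact_solve := by
  intro n a _ hpre hD
  obtain ⟨h0n, hmax, hp2000, hall⟩ := hD
  obtain ⟨hmem, hle⟩ := (List.max?_eq_some_iff).mp (Option.mem_def.mp hmax)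
  obtain ⟨vs, hds⟩ := pvDs_head_D0 a hmem hle
  rw [pvSolve_inside n a hpre vs hds, pvSolveAlt_inside n a (by omega) hmem vs hds]
  have hpP : pvP a = ((a.idxOf (-1) : Nat) : Int) := rfl
  have hIdx : ∀ v ∈ a, pvFirstIdx a v = ((a.idxOf v : Nat) : Int) := fun v _ => rfl
  have hhead_vs : ∀ w ws, vs = w :: ws → a.count (-1) = pvRankN a w := by
    intro w ws hvs
    have hch := pvDs_chain a
    rw [hds, hvs] at hch
    have := hch.rel_head
    rw [pvRankN_neg1 a hle] at this
    omega
  have hmem_vs : ∀ v ∈ vs, v ∈ a :=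
    fun v hv => (pvDs_mem a v).mp (hds ▸ List.mem_cons_of_mem _ hv)
  have hne1 : ∀ v ∈ vs, v ≠ -1 := by
    intro v hv h
    have := List.rel_of_pairwise_cons (hds ▸ pvDs_pairwise a) hv
    omega
  have hgt : ((a.idxOf (-1) : Nat) : Int) < pvGo n a vs (a.count (-1)) 2000 := by
    apply pvGo_gt n a _ vs (a.count (-1)) 2000 hmem_vs ((hds ▸ pvDs_chain a).tail) hhead_vs
    · omega
    · intro v hv hvrk
      have hva := hmem_vs v hv
      have heq : pvRank a v = ((pvRankN a v : Nat) : Int) := rfl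
      rcases hall v hva (by omega) with e | hlt
      · exact absurd e (hne1 v hv)
      · rw [hIdx v hva] at hlt
        omega
  rw [min_eq_left (le_of_lt hgt)]
  omega
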